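-- pv_equiv track=rewrite | github.com/thomve/basic-algorithms | exercices.py | compute_delta_arrays
-- ===== SOURCE A (Python) =====
-- from typing import List
--
-- def compute_delta_arrays(array: List[str]):
--     deltas = []
--     delta = 0
--     for i in range(len(array)):
--         if array[i].isdigit():
--             delta -= 1
--         else:
--             delta += 1
--         deltas.append(delta)
--     return deltas
-- ===== SOURCE B (Python) =====
-- from typing import List
--
--
-- def compute_delta_arrays(array: List[str]):
--     # delta at index i = (#nondigits) - (#digits) in array[:i+1]
--     #                  = (i + 1) - 2 * (#digits among array[:i+1]).
--     # Build the sorted list of digit positions once, then answer each index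
--     # by a binary search counting how many digit positions are <= i.
--     dpos = [i for i, x in enumerate(array) if x.isdigit()]
--
--     def digits_upto(i):
--         lo, hi = 0, len(dpos)
--         while lo < hi:
--             mid = (lo + hi) // 2
--             if dpos[mid] <= i:
--                 lo = mid + 1
--             else:
--                 hi = mid
--         return lo
--
--     return [(i + 1) - 2 * digits_upto(i) for i in range(len(array))]
-- ===== Notes on version B (the rewrite author's own statement) =====
-- stated objective: alternative
-- what changed: Instead of a running accumulator, B uses the identity delta_i = (i+1) - 2*(digits in prefix): it builds the sorted list of digit positions once and answers each index with a binary search counting digit positions <= i.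
import Mathlib
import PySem

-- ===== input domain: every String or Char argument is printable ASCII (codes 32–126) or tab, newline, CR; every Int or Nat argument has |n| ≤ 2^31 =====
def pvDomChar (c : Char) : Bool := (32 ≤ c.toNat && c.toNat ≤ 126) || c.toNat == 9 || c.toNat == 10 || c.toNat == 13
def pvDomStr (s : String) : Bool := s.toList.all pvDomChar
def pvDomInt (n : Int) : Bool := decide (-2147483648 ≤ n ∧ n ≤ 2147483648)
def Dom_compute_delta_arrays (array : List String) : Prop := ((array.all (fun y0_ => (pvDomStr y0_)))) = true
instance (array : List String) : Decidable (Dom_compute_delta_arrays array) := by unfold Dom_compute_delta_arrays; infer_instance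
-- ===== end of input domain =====

-- B drops A's running accumulator: it uses delta_i = (i+1) - 2*(#digits in the prefix),
-- precomputing the sorted digit positions once and counting them per index by binary search.

-- ===== PORT A =====
def compute_delta_arrays (array : List String) : List Int :=
  (((PySem.List.pyRange 0 (PySem.List.len array) 1).foldl
    (fun (st : List Int × Int) i =>
      let delta := if PySem.Str.strIsdigit (PySem.List.pyGetD array i "") then st.2 - 1 else st.2 + 1
      (st.1 ++ [delta], delta)) ([], 0))).1

-- ===== PORT B =====
-- digits_upto's while loop, with fuel `dpos.length + 1` (the interval [lo, hi) starts with
-- length `dpos.length` and strictly shrinks every iteration, so the fuel is never exhausted).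
-- dpos[mid] is always in range in Python; pyGetD's default 0 is never used.
def pvDigitsUptoAux (dpos : List Int) (i : Int) : Nat → Int → Int → Int
  | 0, lo, _ => lo
  | fuel + 1, lo, hi =>
    if lo < hi then
      let mid := PySem.Int.floordiv (lo + hi) 2
      if PySem.List.pyGetD dpos mid 0 ≤ i then
        pvDigitsUptoAux dpos i fuel (mid + 1) hi
      else
        pvDigitsUptoAux dpos i fuel lo mid
    else lo

def compute_delta_arrays_alt (array : List String) : List Int :=
  let dpos := ((PySem.List.enumerate array 0).filter (fun p => PySem.Str.strIsdigit p.2)).map Prod.fst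
  (PySem.List.pyRange 0 (PySem.List.len array) 1).map
    (fun i => (i + 1) - 2 * pvDigitsUptoAux dpos i (dpos.length + 1) 0 (dpos.length : Int))

-- ===== PRECONDITION & SPEC =====
def Spec_compute_delta_arrays (array : List String) (out : List Int) : Prop := out = compute_delta_arrays_alt array
instance (array : List String) (out : List Int) : Decidable (Spec_compute_delta_arrays array out) := by unfold Spec_compute_delta_arrays; infer_instance

-- ===== CLAIM (what is proved, stated in full; the proofs are below) =====
def Claim_equal_compute_delta_arrays : Prop := ∀ (array : List String), Dom_compute_delta_arrays array → Spec_compute_delta_arrays array (compute_delta_arrays array)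

-- ===== LEMMAS AND PROOFS =====

-- A's loop produces, at position j, d + (j+1) - 2*(#digits among the first j+1 elements).
lemma cda_scan (xs : List String) : ∀ (ds : List Int) (d : Int),
    (xs.foldl
      (fun (st : List Int × Int) x =>
        let delta := if PySem.Str.strIsdigit x then st.2 - 1 else st.2 + 1
        (st.1 ++ [delta], delta)) (ds, d)).1
    = ds ++ (List.range xs.length).map
        (fun (j : Nat) => d + ((j : Int) + 1) - 2 * (((xs.take (j + 1)).countP PySem.Str.strIsdigit : Nat) : Int)) := by
  induction xs with
  | nil => intro ds d; simp
  | cons x xs ih =>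
    intro ds d
    simp only [List.foldl_cons]
    rw [ih]
    rw [List.append_assoc]
    congr 1
    rw [List.length_cons, List.range_succ_eq_map, List.map_cons, List.map_map,
      List.singleton_append]
    congr 1
    · simp only [List.take_succ_cons, List.take_zero, List.countP_cons, List.countP_nil]
      split_ifs with h <;> simp [h] <;> push_cast <;> ring
    · apply List.map_congr_left
      intro j _
      simp only [Function.comp_apply, List.take_succ_cons, List.countP_cons]
      split_ifs with h <;> push_cast <;> ring

-- If p holds exactly on the first k positions of l, the filter has length k.
lemma filter_length_of_cut {α : Type} (l : List α) (p : α → Bool) (k : Nat) (hk : k ≤ l.length)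
    (h : ∀ j (hj : j < l.length), p l[j] = true ↔ j < k) : (l.filter p).length = k := by
  conv_lhs => rw [← List.take_append_drop k l]
  rw [List.filter_append, List.length_append]
  have h1 : (l.take k).filter p = l.take k := by
    rw [List.filter_eq_self]
    intro a ha
    obtain ⟨j, hj, rfl⟩ := List.mem_iff_getElem.mp ha
    have hj' : j < k := by simpa using (lt_of_lt_of_le hj (by simp))
    rw [List.getElem_take]
    exact (h j (by omega)).mpr hj'
  have h2 : (l.drop k).filter p = [] := by
    rw [List.filter_eq_nil_iff]
    intro a ha
    obtain ⟨j, hj, rfl⟩ := List.mem_iff_getElem.mp ha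
    rw [List.getElem_drop]
    intro hp
    have := (h (k + j) (by simp at hj; omega)).mp hp
    omega
  rw [h1, h2, List.length_take]
  simp [Nat.min_eq_left hk]

-- The binary search returns the number of elements ≤ i of a sorted list,
-- given the standard invariant on [lo, hi).
lemma bsearch_eq (l : List Int) (hs : l.Pairwise (· ≤ ·)) (i : Int) :
    ∀ (fuel : Nat) (lo hi : Int), 0 ≤ lo → lo ≤ hi → hi ≤ (l.length : Int) →
    (hi - lo).toNat ≤ fuel →
    (∀ j : Nat, (hj : j < l.length) → (((j : Int) < lo → l[j] ≤ i) ∧ (hi ≤ (j : Int) → i < l[j]))) →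
    pvDigitsUptoAux l i fuel lo hi = ((l.filter (fun a => a ≤ i)).length : Int) := by
  have hget := List.pairwise_iff_getElem.mp hs
  have base : ∀ (lo hi : Int), 0 ≤ lo → lo = hi → hi ≤ (l.length : Int) →
      (∀ j : Nat, (hj : j < l.length) → (((j : Int) < lo → l[j] ≤ i) ∧ (hi ≤ (j : Int) → i < l[j]))) →
      lo = ((l.filter (fun a => a ≤ i)).length : Int) := by
    intro lo hi h0 he hlen hinv
    have : (l.filter (fun a => a ≤ i)).length = lo.toNat := by
      apply filter_length_of_cut l _ lo.toNat (by omega)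
      intro j hj
      constructor
      · intro hp
        by_contra hge
        have := (hinv j hj).2 (by omega)
        simp at hp
        omega
      · intro hlt
        have := (hinv j hj).1 (by omega)
        simpa using this
    omega
  intro fuel
  induction fuel with
  | zero =>
    intro lo hi h0 hle hlen hfuel hinv
    simp only [pvDigitsUptoAux]
    exact base lo hi h0 (by omega) hlen hinv
  | succ fuel ih =>
    intro lo hi h0 hle hlen hfuel hinv
    simp only [pvDigitsUptoAux]
    by_cases hlt : lo < hi
    · rw [if_pos hlt]
      have hmid := PySem.Int.floordiv_two_mid_bounds (le_of_lt hlt)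
      have hmlt : PySem.Int.floordiv (lo + hi) 2 < hi := by
        rw [PySem.Int.floordiv_lt_iff_lt_mul (by omega)]
        omega
      set m := PySem.Int.floordiv (lo + hi) 2 with hm
      have hm0 : 0 ≤ m := le_trans h0 hmid.1
      have hmlen : m < (l.length : Int) := lt_of_lt_of_le hmlt hlen
      have hgd : PySem.List.pyGetD l m 0 = l[m.toNat]'(by omega) :=
        PySem.List.pyGetD_eq_getElem l 0 hm0 (by exact_mod_cast hmlen)
      by_cases hc : PySem.List.pyGetD l m 0 ≤ i
      · rw [if_pos hc]
        apply ih (m + 1) hi (by omega) (by omega) hlen (by omega)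
        intro j hj
        refine ⟨?_, (hinv j hj).2⟩
        intro hjlt
        by_cases hje : (j : Int) = m
        · have : j = m.toNat := by omega
          subst this
          rw [← hgd]; exact hc
        · by_cases hjm : (j : Int) < lo
          · exact (hinv j hj).1 hjm
          · have hjm' : j < m.toNat := by omega
            have := hget j m.toNat (by omega) (by omega) hjm'
            rw [hgd] at hc
            exact le_trans this hc
      · rw [if_neg hc]
        apply ih lo m h0 (by omega) (by omega) (by omega)
        intro j hj
        refine ⟨(hinv j hj).1, ?_⟩
        intro hjge
        rw [hgd] at hc
        rw [not_le] at hc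
        by_cases hje : j = m.toNat
        · subst hje; exact hc
        · have : m.toNat < j := by omega
          exact lt_of_lt_of_le hc (hget m.toNat j (by omega) hj this)
    · rw [if_neg hlt]
      exact base lo hi h0 (by omega) hlen hinv

-- Counting digit positions ≤ i equals counting digit entries in the prefix of length i - s + 1.
lemma dpos_count (xs : List String) : ∀ (s i : Int),
    (((((PySem.List.enumerate xs s).filter (fun p => PySem.Str.strIsdigit p.2)).map Prod.fst).filter
        (fun a => a ≤ i)).length : Int)
    = (((xs.take (i - s + 1).toNat).countP PySem.Str.strIsdigit : Nat) : Int) := by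
  induction xs with
  | nil => intro s i; simp [PySem.List.enumerate_nil]
  | cons x xs ih =>
    intro s i
    have ihs := ih (s + 1) i
    rw [PySem.List.enumerate_cons]
    by_cases hsi : s ≤ i
    · have ht : (i - s + 1).toNat = (i - (s + 1) + 1).toNat + 1 := by omega
      rw [ht, List.take_succ_cons, List.countP_cons]
      by_cases hd : PySem.Str.strIsdigit x
      · simp only [List.filter_cons, hd, if_pos, List.map_cons, List.filter_cons,
          decide_eq_true_eq, hsi, if_true, List.length_cons]
        push_cast at ihs ⊢
        omega
      · simp only [List.filter_cons, hd, Bool.false_eq_true, if_false]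
        push_cast at ihs ⊢
        omega
    · have ht0 : (i - s + 1).toNat = 0 := by omega
      have ht1 : (i - (s + 1) + 1).toNat = 0 := by omega
      rw [ht0, List.take_zero, List.countP_nil]
      rw [ht1, List.take_zero, List.countP_nil] at ihs
      by_cases hd : PySem.Str.strIsdigit x
      · simp only [List.filter_cons, hd, if_pos, List.map_cons, List.filter_cons,
          decide_eq_true_eq, hsi, if_false]
        exact ihs
      · simp only [List.filter_cons, hd, Bool.false_eq_true, if_false]
        exact ihs

-- The digit-position list is sorted.
lemma dpos_sorted (xs : List String) (s : Int) :
    ((((PySem.List.enumerate xs s).filter (fun p => PySem.Str.strIsdigit p.2)).map Prod.fst).Pairwise (· ≤ ·)) := by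
  apply List.Pairwise.map
  · intro a b h
    exact h
  · exact ((PySem.List.pairwise_lt_enumerate xs s).filter _).imp (fun h => le_of_lt h)

-- ===== VERDICT (by name: the statement is the Claim_ definition above) =====
theorem compute_delta_arrays_spec : Claim_equal_compute_delta_arrays := by
  intro array _
  unfold Spec_compute_delta_arrays compute_delta_arrays compute_delta_arrays_alt
  rw [PySem.List.foldl_pyRange_zero_pyGetD array ""
    (fun (st : List Int × Int) x =>
      let delta := if PySem.Str.strIsdigit x then st.2 - 1 else st.2 + 1
      (st.1 ++ [delta], delta)) ([], 0)]
  rw [cda_scan array [] 0]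
  simp only [List.nil_append]
  set dpos := ((PySem.List.enumerate array 0).filter (fun p => PySem.Str.strIsdigit p.2)).map Prod.fst with hdp
  have hlen : (PySem.List.len array : Int) = (array.length : Int) := by simp [PySem.List.len_eq]
  rw [hlen, PySem.List.pyRange_zero_natCast, List.map_map]
  apply List.map_congr_left
  intro k hk
  have hk' : k < array.length := List.mem_range.mp hk
  simp only [Function.comp_apply]
  have hb : pvDigitsUptoAux dpos (k : Int) (dpos.length + 1) 0 (dpos.length : Int)
      = ((dpos.filter (fun a => a ≤ (k : Int))).length : Int) := by
    apply bsearch_eq dpos (dpos_sorted array 0) (k : Int) (dpos.length + 1) 0 (dpos.length : Int)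
      (by omega) (by omega) (by omega) (by omega)
    intro j hj
    constructor
    · intro h; omega
    · intro h; omega
  rw [hb, hdp, dpos_count array 0 (k : Int)]
  have : ((k : Int) - 0 + 1).toNat = k + 1 := by omega
  rw [this]
  push_cast
  ring
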